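-- pv_equiv track=rewrite | github.com/mattr555/advent-of-code | 2024/common.py | all_diag
-- ===== SOURCE A (Python) =====
-- def all_diag(grid):
--     ret = []
--     for dist in range(len(grid) + len(grid[0])):
--         d = []
--         for i in range(dist+1):
--             a = i
--             b = dist - i
--             if 0 <= a < len(grid) and 0 <= b < len(grid[0]):
--                 d.append(grid[a][b])
--         ret.append(d)
--     return ret
-- ===== SOURCE B (Python) =====
-- def all_diag(grid):
--     cols = len(grid[0])
--     cells = [(a + b, row[b]) for a, row in enumerate(grid) for b in range(cols)]
--     buckets = {}
--     for key, v in cells: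
--         buckets.setdefault(key, []).append(v)
--     return [buckets.get(d, []) for d in range(len(grid) + cols)]
-- ===== Notes on version B (the rewrite author's own statement) =====
-- stated objective: alternative
-- what changed: B scatters each grid cell once into a dict of buckets keyed by a+b (a group-by over the cells in row-major order) and then reads the buckets out for d in 0..rows+cols-1, instead of A's per-diagonal gather that scans i in 0..dist with a bounds check for every diagonal.
import Mathlib
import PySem

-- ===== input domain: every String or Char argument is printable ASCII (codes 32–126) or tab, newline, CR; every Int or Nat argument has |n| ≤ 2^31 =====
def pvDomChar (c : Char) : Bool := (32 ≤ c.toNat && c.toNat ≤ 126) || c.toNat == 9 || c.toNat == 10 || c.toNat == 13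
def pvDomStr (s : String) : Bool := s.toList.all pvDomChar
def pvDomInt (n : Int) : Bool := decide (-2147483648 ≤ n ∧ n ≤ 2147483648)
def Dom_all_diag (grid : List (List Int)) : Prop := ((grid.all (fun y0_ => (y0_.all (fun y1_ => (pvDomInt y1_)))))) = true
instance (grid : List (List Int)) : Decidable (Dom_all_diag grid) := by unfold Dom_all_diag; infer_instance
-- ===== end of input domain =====

-- B groups the grid cells once into dict buckets keyed by a+b and reads the buckets out, instead of A's per-diagonal gather scan (alternative algorithm; close in measured cost).

-- ===== PORT A =====
def all_diag (grid : List (List Int)) : List (List Int) :=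
  (PySem.List.pyRange 0 ((grid.length : Int) + ((PySem.List.pyGetD grid 0 []).length : Int)) 1).foldl
    (fun ret dist =>
      ret ++ [ (PySem.List.pyRange 0 (dist + 1) 1).foldl
        (fun d i =>
          let a := i
          let b := dist - i
          if 0 ≤ a ∧ a < (grid.length : Int) ∧ 0 ≤ b ∧ b < ((PySem.List.pyGetD grid 0 []).length : Int)
          then d ++ [PySem.List.pyGetD (PySem.List.pyGetD grid a []) b 0]
          else d) [] ]) []

-- ===== PORT B =====
def all_diag_alt (grid : List (List Int)) : List (List Int) :=
  let cols : Int := ((PySem.List.pyGetD grid 0 []).length : Int)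
  let cells : List (Int × Int) :=
    (PySem.List.enumerate grid 0).flatMap (fun p =>
      (PySem.List.pyRange 0 cols 1).map (fun b => (p.1 + b, PySem.List.pyGetD p.2 b 0)))
  let buckets : PySem.Dict Int (List Int) :=
    cells.foldl (fun d p => d.modify p.1 [] (fun l => l ++ [p.2])) PySem.Dict.empty
  (PySem.List.pyRange 0 ((grid.length : Int) + cols) 1).map (fun dd => buckets.getD dd [])

-- ===== PRECONDITION & SPEC =====
-- Pre_ excludes exactly the inputs where the Python raises IndexError: the empty grid
-- (grid[0] fails) and ragged grids with a row shorter than the first row (grid[a][b] / row[b] fails).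
def Pre_all_diag (grid : List (List Int)) : Prop :=
  grid ≠ [] ∧ ∀ row ∈ grid, (grid.headD []).length ≤ row.length
instance (grid : List (List Int)) : Decidable (Pre_all_diag grid) := by unfold Pre_all_diag; infer_instance
def pvWitness_all_diag : List (List Int) := [[1, 2], [3, 4]]
def Spec_all_diag (grid : List (List Int)) (out : List (List Int)) : Prop := out = all_diag_alt grid
instance (grid : List (List Int)) (out : List (List Int)) : Decidable (Spec_all_diag grid out) := by unfold Spec_all_diag; infer_instance

-- ===== CLAIM (what is proved, stated in full; the proofs are below) =====
def Claim_equal_all_diag : Prop := ∀ (grid : List (List Int)), Dom_all_diag grid → Pre_all_diag grid → Spec_all_diag grid (all_diag grid)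

-- ===== LEMMAS AND PROOFS =====

-- filtering an interval condition out of a contiguous range yields the intersected range
theorem pv_filter_interval (n : Nat) (lo hi : Int) : ∀ a : Int,
    (PySem.List.pyRange a (a + n) 1).filter (fun i => decide (lo ≤ i ∧ i ≤ hi)) =
      PySem.List.pyRange (max a lo) (min (a + n - 1) hi + 1) 1 := by
  induction n with
  | zero =>
    intro a
    rw [PySem.List.pyRange_one_eq_nil (by omega), PySem.List.pyRange_one_eq_nil (by omega)]
    rfl
  | succ n ih =>
    intro a
    rw [PySem.List.pyRange_one_cons (by push_cast; omega), List.filter_cons]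
    rw [show a + ((n + 1 : Nat) : Int) = (a + 1) + (n : Int) by push_cast; ring]
    have h := ih (a + 1)
    by_cases hc : lo ≤ a ∧ a ≤ hi
    · simp only [hc, decide_true, and_self, if_true]
      rw [h]
      rw [show max (a + 1) lo = a + 1 by omega, show max a lo = a by omega]
      rw [← PySem.List.pyRange_one_cons (by omega)]
    · simp only [hc, decide_false, Bool.false_eq_true, if_false]
      rw [h]
      rcases not_and_or.mp hc with hlt | hgt
      · rw [show max (a + 1) lo = max a lo by omega]
      · rw [PySem.List.pyRange_one_eq_nil (by omega), PySem.List.pyRange_one_eq_nil (by omega)]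
-- specialised to ranges starting at 0
theorem pv_filter_interval_zero (m lo hi : Int) (hm : 0 ≤ m) :
    (PySem.List.pyRange 0 (m + 1) 1).filter (fun i => decide (lo ≤ i ∧ i ≤ hi)) =
      PySem.List.pyRange (max 0 lo) (min m hi + 1) 1 := by
  have h := pv_filter_interval (m + 1).toNat lo hi 0
  have he : ((0 : Int) + ((m + 1).toNat : Int)) = m + 1 := by omega
  rw [he] at h
  rw [h]
  congr 2
  omega

-- a flatMap of guarded singletons is a map of the filtered list
theorem pv_flatMap_ite (l : List Int) (p : Int → Prop) [DecidablePred p] (f : Int → Int) :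
    l.flatMap (fun a => if p a then [f a] else []) =
      (l.filter (fun a => decide (p a))).map f := by
  induction l with
  | nil => rfl
  | cons x xs ih =>
    rw [List.flatMap_cons, List.filter_cons]
    by_cases hx : p x
    · simp only [hx, decide_true, if_true, List.map_cons, ih, List.cons_append, List.nil_append]
    · simp only [hx, decide_false, Bool.false_eq_true, if_false, ih, List.nil_append]

-- A's inner scan with bounds check equals the direct interval of valid row indices, per diagonal
theorem pv_inner_eq (grid : List (List Int)) (dist : Int) (hd : 0 ≤ dist) :
    (PySem.List.pyRange 0 (dist + 1) 1).foldl
      (fun d i =>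
        let a := i
        let b := dist - i
        if 0 ≤ a ∧ a < (grid.length : Int) ∧ 0 ≤ b ∧ b < ((PySem.List.pyGetD grid 0 []).length : Int)
        then d ++ [PySem.List.pyGetD (PySem.List.pyGetD grid a []) b 0]
        else d) [] =
    (PySem.List.pyRange (max 0 (dist - ((PySem.List.pyGetD grid 0 []).length : Int) + 1))
        (min dist ((grid.length : Int) - 1) + 1) 1).map
      (fun a => PySem.List.pyGetD (PySem.List.pyGetD grid a []) (dist - a) 0) := by
  set R : Int := (grid.length : Int)
  set C : Int := ((PySem.List.pyGetD grid 0 []).length : Int)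
  rw [PySem.List.foldl_append_ite
      (p := fun i => 0 ≤ i ∧ i < R ∧ 0 ≤ dist - i ∧ dist - i < C)
      (f := fun i => PySem.List.pyGetD (PySem.List.pyGetD grid i []) (dist - i) 0)]
  rw [List.nil_append]
  have hcong : (PySem.List.pyRange 0 (dist + 1) 1).filter
        (fun i => decide (0 ≤ i ∧ i < R ∧ 0 ≤ dist - i ∧ dist - i < C)) =
      (PySem.List.pyRange 0 (dist + 1) 1).filter
        (fun i => decide (dist - C + 1 ≤ i ∧ i ≤ min dist (R - 1))) := by
    apply List.filter_congr
    intro i hi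
    have hmem := (PySem.List.mem_pyRange_one).mp hi
    simp only [decide_eq_decide]
    omega
  rw [hcong]
  have h := pv_filter_interval_zero dist (dist - C + 1) (min dist (R - 1)) hd
  rw [h]
  congr 2
  omega

-- B's bucket at key d, read off the cell list, equals the same interval map
theorem pv_bucket_eq (grid : List (List Int)) (d : Int) (hR : grid ≠ []) :
    (((PySem.List.enumerate grid 0).flatMap (fun p =>
        (PySem.List.pyRange 0 ((PySem.List.pyGetD grid 0 []).length : Int) 1).map
          (fun b => (p.1 + b, PySem.List.pyGetD p.2 b 0)))).filter
        (fun p => p.1 == d)).map (·.2) =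
    (PySem.List.pyRange (max 0 (d - ((PySem.List.pyGetD grid 0 []).length : Int) + 1))
        (min d ((grid.length : Int) - 1) + 1) 1).map
      (fun a => PySem.List.pyGetD (PySem.List.pyGetD grid a []) (d - a) 0) := by
  set R : Int := (grid.length : Int) with hRdef
  set C : Int := ((PySem.List.pyGetD grid 0 []).length : Int) with hCdef
  rw [PySem.List.enumerate_eq_map_pyRange (d := []), List.flatMap_map]
  rw [List.filter_flatMap, List.map_flatMap]
  have hlen : PySem.List.len grid = R := by simp [PySem.List.len_eq, hRdef]
  rw [hlen]
  -- reduce each row's contribution to a guarded singleton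
  have hrow : ∀ a : Int,
      (((PySem.List.pyRange 0 C 1).map
          (fun b => ((a, PySem.List.pyGetD grid a []).1 + b,
                     PySem.List.pyGetD (a, PySem.List.pyGetD grid a []).2 b 0))).filter
          (fun p => p.1 == d)).map (·.2) =
      (if 0 ≤ d - a ∧ d - a < C then
        [PySem.List.pyGetD (PySem.List.pyGetD grid a []) (d - a) 0] else []) := by
    intro a
    rw [List.filter_map, List.map_map]
    have hfc : ((PySem.List.pyRange 0 C 1).filter
          ((fun p : Int × Int => p.1 == d) ∘
            (fun b => ((a, PySem.List.pyGetD grid a []).1 + b,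
                       PySem.List.pyGetD (a, PySem.List.pyGetD grid a []).2 b 0)))) =
        (PySem.List.pyRange 0 C 1).filter (fun b => decide (d - a ≤ b ∧ b ≤ d - a)) := by
      apply List.filter_congr
      intro b _
      simp only [Function.comp_apply]
      rw [Bool.eq_iff_iff]
      simp only [beq_iff_eq, decide_eq_true_eq]
      omega
    rw [hfc]
    by_cases hC : 0 < C
    · rw [show C = (C - 1) + 1 by ring] at hfc ⊢
      rw [pv_filter_interval_zero (C - 1) (d - a) (d - a) (by omega)]
      by_cases hv : 0 ≤ d - a ∧ d - a < (C - 1) + 1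
      · rw [show max 0 (d - a) = d - a by omega, show min (C - 1) (d - a) = d - a by omega]
        rw [PySem.List.pyRange_one_singleton, if_pos hv]
        simp
      · rw [PySem.List.pyRange_one_eq_nil (by omega), if_neg hv]
        simp
    · rw [PySem.List.pyRange_one_eq_nil (by omega), List.filter_nil, List.map_nil]
      rw [if_neg (by omega)]
  simp only [hrow]
  rw [pv_flatMap_ite (p := fun a => 0 ≤ d - a ∧ d - a < C)
      (f := fun a => PySem.List.pyGetD (PySem.List.pyGetD grid a []) (d - a) 0)]
  have hR1 : 1 ≤ R := by
    have : 0 < grid.length := List.length_pos_iff.mpr hR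
    omega
  have hcong : (PySem.List.pyRange 0 R 1).filter (fun a => decide (0 ≤ d - a ∧ d - a < C)) =
      (PySem.List.pyRange 0 R 1).filter (fun a => decide (d - C + 1 ≤ a ∧ a ≤ d)) := by
    apply List.filter_congr
    intro a _
    simp only [decide_eq_decide]
    omega
  rw [hcong, show R = (R - 1) + 1 by ring,
      pv_filter_interval_zero (R - 1) (d - C + 1) d (by omega)]
  congr 2
  omega

-- ===== VERDICT (by name: the statement is the Claim_ definition above) =====
theorem all_diag_spec : Claim_equal_all_diag := by
  intro grid _ hpre
  unfold Spec_all_diag all_diag all_diag_alt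
  rw [PySem.List.foldl_append_singleton_eq_map, List.nil_append]
  apply List.map_congr_left
  intro dist hdist
  have hd : 0 ≤ dist := ((PySem.List.mem_pyRange_one).mp hdist).1
  rw [pv_inner_eq grid dist hd]
  rw [PySem.Dict.getD_foldl_modify_append]
  rw [show (PySem.Dict.empty : PySem.Dict Int (List Int)).getD dist [] = [] from rfl,
      List.nil_append]
  exact (pv_bucket_eq grid dist hpre.1).symm
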